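-- pv_equiv track=rewrite | github.com/citp/PrivacyPoliciesOverTime | analysis/python/historical/find_near_documents.py | get_undirected
-- ===== SOURCE A (Python) =====
-- def get_undirected(adj_list):
--     ajl = {}
--     for n in adj_list:
--         if n not in ajl: ajl[n] = set()
--         for o in adj_list[n]:
--             if o not in ajl: ajl[o] = set()
--             ajl[n].add(o)
--             ajl[o].add(n)
--     #pp.pprint(ajl)
--     return ajl
-- ===== SOURCE B (Python) =====
-- def get_undirected(adj_list):
--     # Undirected view of a directed adjacency dict: each node's neighborhood
--     # is the union of its out-edges and its in-edges, computed by one scan of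
--     # the adjacency per node.
--     def neighborhood(x):
--         ns = set()
--         for n, outs in adj_list.items():
--             if n == x:
--                 ns.update(outs)
--             elif x in outs:
--                 ns.add(n)
--         return ns
--
--     # every node mentioned anywhere, deduplicated in order of first mention
--     nodes = dict.fromkeys(v for n, outs in adj_list.items() for v in (n, *outs))
--     return {x: neighborhood(x) for x in nodes}
-- ===== Notes on version B (the rewrite author's own statement) =====
-- stated objective: alternative
-- what changed: B replaces A's single mutating pass (adding both endpoints of every edge into a shared dict of sets) with a functional decomposition: collect every mentioned node with dict.fromkeys, then build each node's undirected neighborhood independently as its out-edges plus the nodes pointing to it, by one scan of the adjacency per node.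
import Mathlib
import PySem

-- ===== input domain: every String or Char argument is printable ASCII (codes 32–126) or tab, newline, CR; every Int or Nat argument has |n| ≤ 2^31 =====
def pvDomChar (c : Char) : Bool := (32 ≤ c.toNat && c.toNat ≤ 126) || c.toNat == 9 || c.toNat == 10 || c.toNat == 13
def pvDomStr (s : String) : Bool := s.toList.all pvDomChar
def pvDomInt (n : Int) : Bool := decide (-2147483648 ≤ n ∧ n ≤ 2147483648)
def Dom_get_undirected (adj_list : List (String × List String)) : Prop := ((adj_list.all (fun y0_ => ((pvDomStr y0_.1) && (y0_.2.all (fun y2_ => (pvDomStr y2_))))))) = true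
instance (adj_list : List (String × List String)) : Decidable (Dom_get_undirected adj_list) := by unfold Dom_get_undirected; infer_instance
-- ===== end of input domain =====

-- B computes each node's undirected neighborhood independently (its out-edges plus
-- every node pointing to it, by one scan of the adjacency per node) instead of A's
-- single pass mutating both endpoints per edge; objective: alternative, not faster.
-- The Python dict argument is modelled as its association list; 'for n in adj_list …
-- adj_list[n]' is ported as iteration over the pairs (exact: a dict's keys are unique).

-- ===== PORT A =====
-- one edge-processing step of A's inner loop body, for fixed source key n
def aStepEdge (n : String) (ajl : PySem.Dict String (PySem.Set String)) (o : String) : PySem.Dict String (PySem.Set String) :=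
  let ajl := if ajl.contains o then ajl else ajl.insert o PySem.Set.empty   -- if o not in ajl: ajl[o] = set()
  let ajl := ajl.modify n PySem.Set.empty (fun s => PySem.Set.add s o)      -- ajl[n].add(o)
  ajl.modify o PySem.Set.empty (fun s => PySem.Set.add s n)                 -- ajl[o].add(n)

-- A's outer loop body for one dict entry (n, outs)
def aStep (ajl : PySem.Dict String (PySem.Set String)) (p : String × List String) : PySem.Dict String (PySem.Set String) :=
  let ajl := if ajl.contains p.1 then ajl else ajl.insert p.1 PySem.Set.empty   -- if n not in ajl: ajl[n] = set()
  p.2.foldl (aStepEdge p.1) ajl                                                 -- for o in adj_list[n]: …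

def get_undirected (adj_list : List (String × List String)) : List (String × List String) :=
  (adj_list.foldl aStep PySem.Dict.empty).items

-- ===== PORT B =====
-- nodes = dict.fromkeys(v for n, outs in adj_list.items() for v in (n, *outs)):
-- every node mentioned anywhere, deduplicated in order of first mention
def bOrder (adj_list : List (String × List String)) : List String :=
  adj_list.foldl (fun order p => (p.1 :: p.2).foldl PySem.Set.add order) []

-- one dict entry inside neighborhood(x): ns.update(outs) / ns.add(n)
def bStep (x : String) (ns : PySem.Set String) (p : String × List String) : PySem.Set String :=
  if p.1 == x then p.2.foldl PySem.Set.add ns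
  else if p.2.contains x then PySem.Set.add ns p.1 else ns

-- neighborhood(x): one scan of the adjacency collecting x's out- and in-edges
def bNbrs (adj_list : List (String × List String)) (x : String) : PySem.Set String :=
  adj_list.foldl (bStep x) PySem.Set.empty

def get_undirected_alt (adj_list : List (String × List String)) : List (String × List String) :=
  (bOrder adj_list).map (fun x => (x, bNbrs adj_list x))

-- ===== PRECONDITION & SPEC =====
def Spec_get_undirected (adj_list : List (String × List String)) (out : List (String × List String)) : Prop := out = get_undirected_alt adj_list
instance (adj_list : List (String × List String)) (out : List (String × List String)) : Decidable (Spec_get_undirected adj_list out) := by unfold Spec_get_undirected; infer_instance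

-- ===== CLAIM (what is proved, stated in full; the proofs are below) =====
def Claim_equal_get_undirected : Prop := ∀ (adj_list : List (String × List String)), Dom_get_undirected adj_list → Spec_get_undirected adj_list (get_undirected adj_list)

-- ===== LEMMAS AND PROOFS =====

-- keys of the "ensure key" step: if k not in d: d[k] = set()
theorem keys_ensure (d : PySem.Dict String (PySem.Set String)) (k : String) :
    (if d.contains k then d else d.insert k PySem.Set.empty).keys = PySem.Set.add d.keys k := by
  by_cases h : d.contains k = true
  · rw [if_pos h, PySem.Set.add_of_mem ((PySem.Dict.contains_iff_mem_keys d k).mp h)]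
  · rw [if_neg h, PySem.Dict.keys_insert_of_not_contains d _ (by simpa using h),
      PySem.Set.add_of_not_mem (fun hm => h ((PySem.Dict.contains_iff_mem_keys d k).mpr hm))]

theorem set_empty_eq : (PySem.Set.empty : PySem.Set String) = [] := rfl

-- the "ensure key" step never changes the value read back with default set() ([] form)
theorem getD_ensure' (d : PySem.Dict String (PySem.Set String)) (k x : String) :
    (if d.contains k then d else d.insert k ([] : PySem.Set String)).getD x [] = d.getD x [] := by
  by_cases h : d.contains k = true
  · rw [if_pos h]
  · rw [if_neg h]
    by_cases hkx : k = x
    · subst hkx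
      rw [PySem.Dict.getD_insert_self, PySem.Dict.getD_of_not_contains d _ (by simpa using h)]
    · exact PySem.Dict.getD_insert_of_ne d _ _ (fun e => hkx e.symm)

-- the "ensure key" step never changes the value read back with default set()
theorem getD_ensure (d : PySem.Dict String (PySem.Set String)) (k x : String) :
    (if d.contains k then d else d.insert k PySem.Set.empty).getD x [] = d.getD x [] := by
  by_cases h : d.contains k = true
  · rw [if_pos h]
  · rw [if_neg h]
    by_cases hkx : k = x
    · subst hkx
      rw [PySem.Dict.getD_insert_self, PySem.Dict.getD_of_not_contains d _ (by simpa using h)]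
      rfl
    · exact PySem.Dict.getD_insert_of_ne d _ _ (fun e => hkx e.symm)

theorem keys_aStepEdge (n : String) (ajl : PySem.Dict String (PySem.Set String)) (o : String)
    (hn : n ∈ ajl.keys) :
    (aStepEdge n ajl o).keys = PySem.Set.add ajl.keys o := by
  unfold aStepEdge
  have h1 := keys_ensure ajl o
  set a1 := if ajl.contains o then ajl else ajl.insert o PySem.Set.empty with ha1
  have hno : n ∈ a1.keys := by rw [h1]; exact (PySem.Set.mem_add _ _ _).mpr (Or.inl hn)
  have hoo : o ∈ a1.keys := by rw [h1]; exact (PySem.Set.mem_add _ _ _).mpr (Or.inr rfl)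
  have h2 : (a1.modify n PySem.Set.empty (fun s => PySem.Set.add s o)).keys = a1.keys := by
    rw [PySem.Dict.keys_modify,
      PySem.Dict.keys_insert_of_contains _ _ ((PySem.Dict.contains_iff_mem_keys _ _).mpr hno)]
  have h3 : o ∈ (a1.modify n PySem.Set.empty (fun s => PySem.Set.add s o)).keys := by
    rw [h2]; exact hoo
  rw [PySem.Dict.keys_modify,
    PySem.Dict.keys_insert_of_contains _ _ ((PySem.Dict.contains_iff_mem_keys _ _).mpr h3),
    h2, h1]

-- A's inner edge loop, keys: appends each unseen o in order
theorem keys_foldEdges (n : String) (outs : List String) (d : PySem.Dict String (PySem.Set String))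
    (hn : n ∈ d.keys) :
    (outs.foldl (aStepEdge n) d).keys = PySem.Set.update d.keys outs := by
  induction outs generalizing d with
  | nil => rfl
  | cons o outs ih =>
    rw [List.foldl_cons, PySem.Set.update_eq_foldl, List.foldl_cons, ← PySem.Set.update_eq_foldl,
      ← keys_aStepEdge n d o hn]
    exact ih _ (by rw [keys_aStepEdge n d o hn]; exact (PySem.Set.mem_add _ _ _).mpr (Or.inl hn))

theorem keys_aStep (ajl : PySem.Dict String (PySem.Set String)) (p : String × List String) :
    (aStep ajl p).keys = PySem.Set.update ajl.keys (p.1 :: p.2) := by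
  unfold aStep
  rw [keys_foldEdges p.1 p.2 _
      (by rw [keys_ensure]; exact (PySem.Set.mem_add _ _ _).mpr (Or.inr rfl)),
    keys_ensure, PySem.Set.update_eq_foldl, PySem.Set.update_eq_foldl, List.foldl_cons]

-- value at x after one edge step of A
theorem getD_aStepEdge (n : String) (ajl : PySem.Dict String (PySem.Set String)) (o x : String) :
    (aStepEdge n ajl o).getD x [] =
      (if n = x then PySem.Set.add (ajl.getD x []) o
       else if o = x then PySem.Set.add (ajl.getD x []) n
       else ajl.getD x []) := by
  simp only [aStepEdge, set_empty_eq]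
  rw [PySem.Dict.getD_modify, PySem.Dict.getD_modify, PySem.Dict.getD_modify]
  by_cases hn : n = x <;> by_cases ho : o = x
  · simp [getD_ensure', hn, ho]
  · simp [getD_ensure', hn, Ne.symm ho]
  · simp [getD_ensure', ho, hn, Ne.symm hn]
  · simp [getD_ensure', hn, ho, Ne.symm hn, Ne.symm ho]

-- A's inner edge loop, value at x, matches B's one-entry step
theorem getD_foldEdges (n : String) (outs : List String) (x : String)
    (d : PySem.Dict String (PySem.Set String)) :
    (outs.foldl (aStepEdge n) d).getD x [] =
      (if n = x then outs.foldl PySem.Set.add (d.getD x [])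
       else if outs.contains x then PySem.Set.add (d.getD x []) n
       else d.getD x []) := by
  induction outs generalizing d with
  | nil => simp
  | cons o outs ih =>
    rw [List.foldl_cons, ih, getD_aStepEdge]
    by_cases hn : n = x <;> by_cases ho : o = x
    · simp [hn, ho]
    · simp [hn]
    · simp [ho, hn]
    · simp [hn, ho, Ne.symm ho]

theorem getD_aStep (ajl : PySem.Dict String (PySem.Set String)) (p : String × List String) (x : String) :
    (aStep ajl p).getD x [] = bStep x (ajl.getD x []) p := by
  unfold aStep bStep
  rw [getD_foldEdges, getD_ensure]
  by_cases h : p.1 = x <;> simp [h]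

-- the whole fold of A: keys and values
theorem keys_foldA (adj : List (String × List String)) (ajl : PySem.Dict String (PySem.Set String)) :
    (adj.foldl aStep ajl).keys = adj.foldl (fun order p => (p.1 :: p.2).foldl PySem.Set.add order) ajl.keys := by
  induction adj generalizing ajl with
  | nil => rfl
  | cons p adj ih => simp only [List.foldl_cons, ih, keys_aStep]; rfl

theorem getD_foldA (adj : List (String × List String)) (ajl : PySem.Dict String (PySem.Set String)) (x : String) :
    (adj.foldl aStep ajl).getD x [] = adj.foldl (bStep x) (ajl.getD x []) := by
  induction adj generalizing ajl with
  | nil => rfl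
  | cons p adj ih => simp only [List.foldl_cons, ih, getD_aStep]

theorem nodup_keys_foldA (adj : List (String × List String)) :
    ((adj.foldl aStep PySem.Dict.empty).keys).Nodup := by
  induction adj using List.reverseRecOn with
  | nil => exact List.nodup_nil
  | append_singleton adj p ih =>
    rw [List.foldl_append, List.foldl_cons, List.foldl_nil, keys_aStep,
      PySem.Set.update_eq_foldl]
    exact PySem.Set.nodup_update _ _ ih

-- ===== VERDICT (by name: the statement is the Claim_ definition above) =====
theorem get_undirected_spec : Claim_equal_get_undirected := by
  intro adj _
  show get_undirected adj = get_undirected_alt adj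
  unfold get_undirected get_undirected_alt
  rw [PySem.Dict.items_eq_map_keys _ (nodup_keys_foldA adj) []]
  have hk : (adj.foldl aStep PySem.Dict.empty).keys = bOrder adj := keys_foldA adj PySem.Dict.empty
  rw [hk]
  apply List.map_congr_left
  intro x _
  rw [getD_foldA]
  rfl
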